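-- pv_equiv track=rewrite | github.com/ZJU-REAL/EasySteer-vllm-v1 | vllm/hidden_states/moe_wrapper.py | extract_moe_layer_id_from_name
-- ===== SOURCE A (Python) =====
-- from typing import Optional
--
-- def extract_moe_layer_id_from_name(module_name: str) -> Optional[int]:
--     """
--     Extract layer ID from MoE module name
--
--     Args:
--         module_name: Module name like 'model.layers.10.block_sparse_moe'
--
--     Returns:
--         Layer ID as integer, or None if not found
--
--     Examples:
--         'model.layers.10.block_sparse_moe' -> 10
--         'transformer.h.12.mlp' -> 12
--         'model.moe_layer' -> None (no layer number)
--     """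
--     parts = module_name.split('.')
--
--     # Look for numeric parts
--     for i, part in enumerate(parts):
--         if part.isdigit():
--             # Check if previous part suggests this is a layer index
--             if i > 0:
--                 prev_part = parts[i - 1].lower()
--                 if prev_part in ['layers', 'h', 'layer', 'blocks', 'block']:
--                     return int(part)
--
--     return None
-- ===== SOURCE B (Python) =====
-- from typing import Optional
--
-- _KEYS = ('layers', 'layer', 'h', 'blocks', 'block')
--
--
-- def extract_moe_layer_id_from_name(module_name: str) -> Optional[int]:
--     """Split-free scan: find the first layer keyword that starts a dotted
--     segment and is immediately followed by an all-digit segment."""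
--     s = module_name.lower()
--     n = len(s)
--     for i in range(n):
--         if i == 0 or s[i - 1] == '.':
--             for k in _KEYS:
--                 j = i + len(k)
--                 if s.startswith(k, i) and j < n and s[j] == '.':
--                     d = j + 1
--                     while d < n and '0' <= s[d] <= '9':
--                         d += 1
--                     if d > j + 1 and (d == n or s[d] == '.'):
--                         return int(s[j + 1:d])
--     return None
-- ===== Notes on version B (the rewrite author's own statement) =====
-- stated objective: alternative
-- what changed: B replaces A's split-into-a-list-of-parts and enumerate-with-index-lookback scan by a split-free, keyword-anchored character scan of the lowered string: it walks the string once and at each dotted-segment start tries to match a layer keyword followed by a separator, an all-digit run and a segment boundary, building no intermediate list of parts.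
import Mathlib
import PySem

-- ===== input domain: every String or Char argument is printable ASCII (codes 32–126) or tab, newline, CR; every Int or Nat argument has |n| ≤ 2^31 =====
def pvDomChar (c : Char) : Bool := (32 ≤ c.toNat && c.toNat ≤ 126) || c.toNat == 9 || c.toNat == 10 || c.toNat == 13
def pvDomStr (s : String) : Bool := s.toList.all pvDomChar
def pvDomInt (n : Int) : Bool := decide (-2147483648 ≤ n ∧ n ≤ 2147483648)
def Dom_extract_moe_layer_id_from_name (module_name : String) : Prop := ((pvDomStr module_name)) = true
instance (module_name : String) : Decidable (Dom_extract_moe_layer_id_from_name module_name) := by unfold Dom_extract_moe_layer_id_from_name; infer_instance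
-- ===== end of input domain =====

-- B replaces A's split-into-parts-and-enumerate scan by a split-free, keyword-anchored
-- character scan of the lowered string (objective: alternative; same result, no list of parts built).

-- ===== PORT A =====
def pvAKeys : List String := ["layers", "h", "layer", "blocks", "block"]

-- `for i, part in enumerate(parts): ...` with early return
def pvALoop (parts : List String) : List (Int × String) → Option Int
  | [] => none
  | (i, part) :: rest =>
    if PySem.Str.strIsdigit part then
      if i > 0 then
        -- parts[i-1]: always in range when reached (1 ≤ i < len(parts)); the `.getD ""` default is dead
        let prev := PySem.Str.lower ((PySem.List.pyGet? parts (i - 1)).getD "")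
        if prev ∈ pvAKeys then PySem.Int.ofStr? part
        else pvALoop parts rest
      else pvALoop parts rest
    else pvALoop parts rest

def extract_moe_layer_id_from_name (module_name : String) : Option Int :=
  -- module_name.split('.'): the separator "." is nonempty, so split? is always `some`
  let parts := (PySem.Str.split? module_name ".").getD []
  pvALoop parts (PySem.List.enumerate parts 0)

-- ===== PORT B =====
def pvBKeys : List (List Char) := ["layers", "layer", "h", "blocks", "block"].map String.toList

-- the `while d < n and '0' <= s[d] <= '9'` run (Source B collects it as the slice s[j+1:d])
def pvDigits : List Char → List Char
  | [] => []
  | c :: t => if '0' ≤ c ∧ c ≤ '9' then c :: pvDigits t else []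

-- inner `for k in _KEYS` loop at position i, ported on the suffix s[i:]:
-- `s.startswith(k, i)` = k.isPrefixOf, `j < n and s[j] == '.'` = the drop starts with '.',
-- `d > j + 1 and (d == n or s[d] == '.')` = the checks on the digit run.
-- `some r` = Python returned (r = int(s[j+1:d]) as ofChars?), `none` = fall through to next i.
def pvBTry (s : List Char) : List (List Char) → Option (Option Int)
  | [] => none
  | k :: ks =>
    let rest := s.drop k.length
    if k.isPrefixOf s ∧ rest.headD ' ' = '.' then
      let t := rest.tail
      let ds := pvDigits t
      if ds ≠ [] ∧ (t.drop ds.length = [] ∨ (t.drop ds.length).headD ' ' = '.') then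
        some (PySem.Int.ofChars? ds)
      else pvBTry s ks
    else pvBTry s ks

-- outer `for i in range(n)` loop, ported on the suffix s[i:];
-- atStart = (i == 0 or s[i-1] == '.')
def pvBScan : Bool → List Char → Option Int
  | _, [] => none
  | atStart, c :: t =>
    if atStart then
      match pvBTry (c :: t) pvBKeys with
      | some r => r
      | none => pvBScan (c == '.') t
    else pvBScan (c == '.') t

def extract_moe_layer_id_from_name_alt (module_name : String) : Option Int :=
  pvBScan true (PySem.Chars.lower module_name.toList)

-- ===== PRECONDITION & SPEC =====
def Spec_extract_moe_layer_id_from_name (module_name : String) (out : Option Int) : Prop := out = extract_moe_layer_id_from_name_alt module_name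
instance (module_name : String) (out : Option Int) : Decidable (Spec_extract_moe_layer_id_from_name module_name out) := by unfold Spec_extract_moe_layer_id_from_name; infer_instance

-- ===== CLAIM (what is proved, stated in full; the proofs are below) =====
def Claim_equal_extract_moe_layer_id_from_name : Prop := ∀ (module_name : String), Dom_extract_moe_layer_id_from_name module_name → Spec_extract_moe_layer_id_from_name module_name (extract_moe_layer_id_from_name module_name)

-- ===== LEMMAS AND PROOFS =====

-- ---- reference split: module_name.split('.') on the char level ----
def pvSplit : List Char → List (List Char)
  | [] => [[]]
  | c :: t => if c = '.' then [] :: pvSplit t else (c :: (pvSplit t).headI) :: (pvSplit t).tail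

def pvJoin : List (List Char) → List Char
  | [] => []
  | [p] => p
  | p :: q :: r => p ++ '.' :: pvJoin (q :: r)

theorem pvSplit_ne_nil (s : List Char) : pvSplit s ≠ [] := by
  cases s
  · simp [pvSplit]
  · simp only [pvSplit]
    split <;> simp

theorem pvSplit_head_cons (s : List Char) :
    (pvSplit s).headI :: (pvSplit s).tail = pvSplit s := by
  cases h : pvSplit s with
  | nil => exact absurd h (pvSplit_ne_nil s)
  | cons a l => rfl

theorem pvSplit_dotfree (s : List Char) : ∀ p ∈ pvSplit s, '.' ∉ p := by
  induction s with
  | nil => simp [pvSplit]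
  | cons c t ih =>
    by_cases hc : c = '.'
    · simp [pvSplit, hc]; exact ih
    · intro p hp
      rw [pvSplit, if_neg hc] at hp
      rcases List.mem_cons.mp hp with h | h
      · subst h
        intro hmem
        rcases List.mem_cons.mp hmem with h | h
        · exact hc h.symm
        · cases ht : pvSplit t with
          | nil => exact absurd ht (pvSplit_ne_nil t)
          | cons a l =>
            rw [ht] at h
            exact ih a (by rw [ht]; exact List.mem_cons_self) h
      · cases ht : pvSplit t with
        | nil => exact absurd ht (pvSplit_ne_nil t)
        | cons a l =>
          rw [ht] at h
          exact ih p (by rw [ht]; exact List.mem_cons_of_mem a h)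

theorem pvJoin_nil_cons (L : List (List Char)) (hL : L ≠ []) :
    pvJoin ([] :: L) = '.' :: pvJoin L := by
  cases L with
  | nil => exact absurd rfl hL
  | cons q r => rfl

theorem pvJoin_cons_head (c : Char) (p : List Char) (r : List (List Char)) :
    pvJoin ((c :: p) :: r) = c :: pvJoin (p :: r) := by
  cases r <;> simp [pvJoin]

theorem pvSplit_join (s : List Char) : pvJoin (pvSplit s) = s := by
  induction s with
  | nil => rfl
  | cons c t ih =>
    by_cases hc : c = '.'
    · rw [pvSplit, if_pos hc, pvJoin_nil_cons _ (pvSplit_ne_nil t), ih, hc]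
    · rw [pvSplit, if_neg hc]
      have := pvSplit_head_cons t
      calc pvJoin ((c :: (pvSplit t).headI) :: (pvSplit t).tail)
          = c :: pvJoin ((pvSplit t).headI :: (pvSplit t).tail) := pvJoin_cons_head _ _ _
        _ = c :: t := by rw [this, ih]

-- ---- PySem.Chars.splitOn with separator "." is pvSplit ----
theorem splitOn_go_eq (fuel : Nat) : ∀ (l cur : List Char) (acc : List (List Char)),
    l.length < fuel →
    PySem.Chars.splitOn.go ['.'] fuel l cur acc =
      acc.reverse ++ (cur.reverse ++ (pvSplit l).headI) :: (pvSplit l).tail := by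
  induction fuel with
  | zero => intro l cur acc h; omega
  | succ n ih =>
    intro l cur acc h
    cases l with
    | nil =>
      rw [PySem.Chars.splitOn.go.eq_def]
      simp [pvSplit]
    | cons c rest =>
      rw [PySem.Chars.splitOn.go.eq_def]
      by_cases hc : c = '.'
      · have hpre : (['.'] : List Char).isPrefixOf (c :: rest) = true := by
          subst hc; simp [List.isPrefixOf]
        simp only [hpre, if_true, List.length_cons, List.length_nil, List.drop_succ_cons, List.drop_zero]
        rw [ih rest [] (cur.reverse :: acc) (by simpa using Nat.lt_of_succ_lt_succ h)]
        rw [pvSplit, if_pos hc]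
        simp [pvSplit_head_cons]
      · have hpre : (['.'] : List Char).isPrefixOf (c :: rest) = false := by
          simp [List.isPrefixOf, BEq.beq]
          intro hh; exact absurd hh.symm hc
        simp only [hpre, Bool.false_eq_true, if_false]
        rw [ih rest (c :: cur) acc (by simpa using Nat.lt_of_succ_lt_succ h)]
        rw [pvSplit, if_neg hc]
        simp

theorem splitOn_eq_pvSplit (s : List Char) :
    PySem.Chars.splitOn s ['.'] = pvSplit s := by
  show PySem.Chars.splitOn.go ['.'] (s.length + 1) s [] [] = _
  rw [splitOn_go_eq (s.length + 1) s [] [] (Nat.lt_succ_self _)]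
  simp [pvSplit_head_cons]

-- ---- char facts ----
theorem pvLowerChar_eq (c : Char) :
    PySem.Chars.lowerChar c =
      if 'A' ≤ c ∧ c ≤ 'Z' then Char.ofNat (c.toNat + 32) else c := by
  rw [PySem.Chars.lowerChar, PySem.Chars.isupper]
  by_cases h : 'A' ≤ c ∧ c ≤ 'Z'
  · rw [if_pos h]
    simp [h.1, h.2]
  · rw [if_neg h]
    rcases (not_and_or.mp h) with h1 | h1 <;> simp [h1]

theorem pv_upper_toNat {c : Char} (h : 'A' ≤ c ∧ c ≤ 'Z') :
    65 ≤ c.toNat ∧ c.toNat ≤ 90 := by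
  have h1 : ('A' : Char).toNat ≤ c.toNat := h.1
  have h2 : c.toNat ≤ ('Z' : Char).toNat := h.2
  exact ⟨h1, h2⟩

theorem pv_lowerChar_upper_toNat {c : Char} (h : 'A' ≤ c ∧ c ≤ 'Z') :
    (PySem.Chars.lowerChar c).toNat = c.toNat + 32 := by
  rw [pvLowerChar_eq, if_pos h, Char.toNat_ofNat]
  have hu := pv_upper_toNat h
  rw [if_pos]
  unfold Nat.isValidChar
  left; omega

theorem pvLowerChar_dot_iff (c : Char) : PySem.Chars.lowerChar c = '.' ↔ c = '.' := by
  by_cases h : 'A' ≤ c ∧ c ≤ 'Z'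
  · constructor
    · intro he
      have := pv_lowerChar_upper_toNat h
      rw [he] at this
      have hc := pv_upper_toNat h
      have : ('.' : Char).toNat = c.toNat + 32 := this
      simp at this; omega
    · intro he
      exfalso
      have := pv_upper_toNat h
      rw [he] at this
      simp at this
  · rw [pvLowerChar_eq, if_neg h]

theorem pv_char_le_iff (a b : Char) : a ≤ b ↔ a.toNat ≤ b.toNat := ge_iff_le

theorem pvLowerChar_digit_range (c : Char) :
    (('0' ≤ PySem.Chars.lowerChar c ∧ PySem.Chars.lowerChar c ≤ '9') ↔ ('0' ≤ c ∧ c ≤ '9')) := by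
  by_cases h : 'A' ≤ c ∧ c ≤ 'Z'
  · have hl := pv_lowerChar_upper_toNat h
    have hu := pv_upper_toNat h
    simp only [pv_char_le_iff, hl]
    have h9 : ('9' : Char).toNat = 57 := rfl
    have h0 : ('0' : Char).toNat = 48 := rfl
    constructor <;> intro hh <;> exfalso <;> omega
  · rw [pvLowerChar_eq, if_neg h]

theorem pvIsdigit_lowerChar (c : Char) :
    PySem.Chars.isdigit (PySem.Chars.lowerChar c) = PySem.Chars.isdigit c := by
  rw [PySem.Chars.isdigit, PySem.Chars.isdigit]
  have := pvLowerChar_digit_range c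
  by_cases h : '0' ≤ c ∧ c ≤ '9'
  · simp [h.1, h.2, (this.mpr h).1, (this.mpr h).2]
  · have h2 : ¬ ('0' ≤ PySem.Chars.lowerChar c ∧ PySem.Chars.lowerChar c ≤ '9') := fun hh => h (this.mp hh)
    rcases not_and_or.mp h with h1 | h1 <;> rcases not_and_or.mp h2 with h3 | h3 <;> simp [h1, h3]

theorem pvLowerChar_digit_fix {c : Char} (h : PySem.Chars.isdigit c = true) :
    PySem.Chars.lowerChar c = c := by
  rw [PySem.Chars.isdigit] at h
  simp only [Bool.and_eq_true, decide_eq_true_eq] at h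
  rw [pvLowerChar_eq, if_neg]
  intro hu
  have h1 := pv_upper_toNat hu
  have h2 : c.toNat ≤ ('9' : Char).toNat := h.2
  have : ('9' : Char).toNat = 57 := rfl
  omega

theorem pvLower_digits_fix {q : List Char} (h : PySem.Chars.strIsdigit q = true) :
    PySem.Chars.lower q = q := by
  rw [PySem.Chars.strIsdigit] at h
  simp only [Bool.and_eq_true, List.all_eq_true] at h
  rw [PySem.Chars.lower]
  have hc : ∀ c ∈ q, PySem.Chars.lowerChar c = id c := fun c hc => pvLowerChar_digit_fix (h.2 c hc)
  exact (List.map_congr_left hc).trans (List.map_id q)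

theorem pvStrIsdigit_lower (q : List Char) :
    PySem.Chars.strIsdigit (PySem.Chars.lower q) = PySem.Chars.strIsdigit q := by
  rw [PySem.Chars.strIsdigit, PySem.Chars.strIsdigit, PySem.Chars.lower]
  simp [List.all_map, Function.comp_def, pvIsdigit_lowerChar]

theorem pvSplit_lower (s : List Char) :
    pvSplit (List.map PySem.Chars.lowerChar s) = (pvSplit s).map (List.map PySem.Chars.lowerChar) := by
  induction s with
  | nil => rfl
  | cons c t ih =>
    by_cases hc : c = '.'
    · rw [List.map_cons, pvSplit, pvSplit, if_pos hc, if_pos ((pvLowerChar_dot_iff c).mpr hc)]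
      rw [List.map_cons, ih]
      rfl
    · rw [List.map_cons, pvSplit, pvSplit, if_neg hc,
        if_neg (fun hh => hc ((pvLowerChar_dot_iff c).mp hh))]
      rw [ih]
      cases ht : pvSplit t with
      | nil => exact absurd ht (pvSplit_ne_nil t)
      | cons a l => simp

-- ---- reference scans ----
def pvAKeysL : List (List Char) := pvAKeys.map String.toList

def pvRefA : Option (List Char) → List (List Char) → Option Int
  | _, [] => none
  | none, q :: r => pvRefA (some q) r
  | some p, q :: r =>
    if PySem.Chars.strIsdigit q ∧ PySem.Chars.lower p ∈ pvAKeysL then PySem.Int.ofChars? q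
    else pvRefA (some q) r

def pvRefB : List (List Char) → Option Int
  | [] => none
  | [_] => none
  | p :: q :: r =>
    if p ∈ pvBKeys ∧ PySem.Chars.strIsdigit q then PySem.Int.ofChars? q
    else pvRefB (q :: r)

theorem pvRefA_nil (prev : Option (List Char)) : pvRefA prev [] = none := by
  cases prev <;> rfl

theorem pvRefA_none_cons (q : List Char) (r : List (List Char)) :
    pvRefA none (q :: r) = pvRefA (some q) r := rfl

theorem pvRefA_some_cons (p q : List Char) (r : List (List Char)) :
    pvRefA (some p) (q :: r) =
      if PySem.Chars.strIsdigit q ∧ PySem.Chars.lower p ∈ pvAKeysL then PySem.Int.ofChars? q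
      else pvRefA (some q) r := rfl

theorem pvRefB_single (p : List Char) : pvRefB [p] = none := rfl

theorem pvRefB_cons2 (p q : List Char) (r : List (List Char)) :
    pvRefB (p :: q :: r) =
      if p ∈ pvBKeys ∧ PySem.Chars.strIsdigit q then PySem.Int.ofChars? q
      else pvRefB (q :: r) := rfl

-- ---- A-side: pvALoop computes pvRefA over the parts ----
theorem pvALoop_eq (parts : List String) : ∀ (n k : Nat), parts.length - k = n → k ≤ parts.length →
    pvALoop parts (PySem.List.enumerate (parts.drop k) (k : Int)) =
      pvRefA (if k = 0 then none else some ((parts.getD (k-1) "").toList))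
        ((parts.drop k).map String.toList) := by
  intro n
  induction n with
  | zero =>
    intro k hn hk
    have : parts.drop k = [] := List.drop_eq_nil_iff.mpr (by omega)
    rw [this]
    simp [pvALoop, pvRefA_nil, PySem.List.enumerate]
  | succ n ih =>
    intro k hn hk
    have hklt : k < parts.length := by omega
    rw [List.drop_eq_getElem_cons hklt, PySem.List.enumerate.eq_2, pvALoop, List.map_cons]
    have hih := ih (k+1) (by omega) (by omega)
    have hsucc : ((k : Int) + 1) = ((k + 1 : Nat) : Int) := by push_cast; ring
    have hgd : parts.getD ((k+1)-1) "" = parts[k] := by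
      simp [List.getD_eq_getElem?_getD, List.getElem?_eq_getElem hklt]
    by_cases hdig : PySem.Str.strIsdigit parts[k] = true
    · rw [if_pos hdig]
      by_cases hk0 : k = 0
      · subst hk0
        rw [if_neg (by simp), if_pos rfl, pvRefA_none_cons]
        rw [show ((0 : Nat) : Int) + 1 = ((1 : Nat) : Int) by norm_num]
        rw [hih, if_neg (by omega), hgd]
      · rw [if_pos (by exact_mod_cast Int.natCast_pos.mpr (Nat.pos_of_ne_zero hk0))]
        have hkm : (k : Int) - 1 = ((k - 1 : Nat) : Int) := by
          have : 1 ≤ k := Nat.one_le_iff_ne_zero.mpr hk0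
          push_cast [this]; ring
        have hkm1 : k - 1 < parts.length := by omega
        rw [hkm, PySem.List.pyGet?_natCast, List.getElem?_eq_getElem hkm1]
        simp only [Option.getD_some]
        have hmem : (PySem.Str.lower parts[k-1] ∈ pvAKeys) ↔
            (PySem.Chars.lower parts[k-1].toList ∈ pvAKeysL) := by
          rw [pvAKeysL, ← PySem.Str.toList_lower]
          exact (List.mem_map_of_injective (fun _ _ h => String.toList_injective h)).symm
        have hprev : (if k = 0 then none else some ((parts.getD (k-1) "").toList)) =
            some (parts[k-1].toList) := by
          rw [if_neg hk0]
          simp [List.getD_eq_getElem?_getD, List.getElem?_eq_getElem hkm1]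
        rw [hprev, pvRefA_some_cons]
        by_cases hin : PySem.Str.lower parts[k-1] ∈ pvAKeys
        · rw [if_pos hin, if_pos]
          · rw [← PySem.Int.ofStr?_ofList parts[k].toList]
            congr 1
            exact String.ofList_toList.symm
          · constructor
            · rw [PySem.Str.strIsdigit_eq] at hdig; exact hdig
            · exact hmem.mp hin
        · rw [if_neg hin, if_neg]
          · rw [hsucc, hih, if_neg (by omega), hgd]
          · intro hc
            exact hin (hmem.mpr hc.2)
    · rw [if_neg hdig, hsucc, hih, if_neg (by omega), hgd]
      by_cases hk0 : k = 0
      · rw [if_pos hk0, pvRefA_none_cons]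
      · rw [if_neg hk0, pvRefA_some_cons, if_neg]
        intro hc
        rw [PySem.Str.strIsdigit_eq] at hdig
        exact hdig hc.1

theorem pvA_eq_refA (module_name : String) :
    extract_moe_layer_id_from_name module_name = pvRefA none (pvSplit module_name.toList) := by
  have hsp : PySem.Str.split? module_name "." =
      some ((PySem.Chars.splitOn module_name.toList ['.']).map String.ofList) := by
    rw [PySem.Str.split?.eq_1]
    rw [PySem.Chars.split?.eq_1]
    simp
  rw [extract_moe_layer_id_from_name]
  simp only [hsp, Option.getD_some]
  set parts := (PySem.Chars.splitOn module_name.toList ['.']).map String.ofList with hparts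
  have h0 := pvALoop_eq parts (parts.length) 0 (by omega) (by omega)
  simp only [List.drop_zero, Int.natCast_zero] at h0
  rw [h0]
  congr 1
  rw [hparts, List.map_map, splitOn_eq_pvSplit]
  have : (String.toList ∘ String.ofList) = id := by
    funext l; simp
  rw [this, List.map_id]

-- ---- bridge pvRefA → pvRefB on the lowered parts ----
theorem pvKeys_mem_iff (x : List Char) : x ∈ pvAKeysL ↔ x ∈ pvBKeys := by
  simp [pvAKeysL, pvAKeys, pvBKeys]
  tauto

theorem pvRefA_some_eq (l : List (List Char)) : ∀ (p : List Char),
    pvRefA (some p) l = pvRefB (PySem.Chars.lower p :: l.map PySem.Chars.lower) := by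
  induction l with
  | nil => intro p; rfl
  | cons q r ih =>
    intro p
    rw [pvRefA_some_cons, List.map_cons, pvRefB_cons2]
    by_cases hc : PySem.Chars.strIsdigit q = true ∧ PySem.Chars.lower p ∈ pvAKeysL
    · rw [if_pos hc, if_pos]
      · rw [pvLower_digits_fix hc.1]
      · exact ⟨(pvKeys_mem_iff _).mp hc.2, by rw [pvStrIsdigit_lower]; exact hc.1⟩
    · rw [if_neg hc, if_neg, ih q]
      intro hcc
      exact hc ⟨by rw [← pvStrIsdigit_lower]; exact hcc.2, (pvKeys_mem_iff _).mpr hcc.1⟩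

theorem pvRefA_none_eq (l : List (List Char)) :
    pvRefA none l = pvRefB (l.map PySem.Chars.lower) := by
  cases l with
  | nil => rfl
  | cons p r =>
    rw [pvRefA_none_cons, pvRefA_some_eq, List.map_cons]

-- ---- B-side: digit-run facts ----
def pvDcheckP (t : List Char) : Prop :=
  pvDigits t ≠ [] ∧ (t.drop (pvDigits t).length = [] ∨ (t.drop (pvDigits t).length).headD ' ' = '.')

theorem pvDigits_all {q : List Char} (h : ∀ c ∈ q, '0' ≤ c ∧ c ≤ '9') (z : List Char)
    (hz : z = [] ∨ ∃ w, z = '.' :: w) : pvDigits (q ++ z) = q := by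
  induction q with
  | nil =>
    rcases hz with hz | ⟨w, hz⟩ <;> subst hz <;> simp [pvDigits]
  | cons c q' ih =>
    rw [List.cons_append, pvDigits, if_pos (h c List.mem_cons_self)]
    rw [ih (fun c hc => h c (List.mem_cons_of_mem _ hc))]

theorem pvDcheck_iff (q : List Char) : ∀ (z : List Char), '.' ∉ q →
    (z = [] ∨ ∃ w, z = '.' :: w) →
    (pvDcheckP (q ++ z) ↔ PySem.Chars.strIsdigit q = true) := by
  induction q with
  | nil =>
    intro z _ hz
    rcases hz with hz | ⟨w, hz⟩ <;> subst hz <;>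
      simp [pvDcheckP, pvDigits, PySem.Chars.strIsdigit]
  | cons c q' ih =>
    intro z hdot hz
    by_cases hc : '0' ≤ c ∧ c ≤ '9'
    · have step : pvDigits ((c :: q') ++ z) = c :: pvDigits (q' ++ z) := by
        rw [List.cons_append, pvDigits, if_pos hc]
      constructor
      · intro hchk
        rcases hchk with ⟨_, h2⟩
        rw [step] at h2
        simp only [List.length_cons, List.cons_append] at h2
        rw [List.drop_succ_cons] at h2
        have hq' : pvDcheckP (q' ++ z) ∨ pvDigits (q' ++ z) = [] := by
          by_cases he : pvDigits (q' ++ z) = []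
          · right; exact he
          · left; exact ⟨he, h2⟩
        rcases hq' with hq' | hq'
        · have := (ih z (fun hm => hdot (List.mem_cons_of_mem _ hm)) hz).mp hq'
          rw [PySem.Chars.strIsdigit] at this ⊢
          simp only [Bool.and_eq_true, List.all_eq_true] at this ⊢
          constructor
          · simp
          · intro x hx
            rcases List.mem_cons.mp hx with hx | hx
            · subst hx; simp [PySem.Chars.isdigit, hc.1, hc.2]
            · exact this.2 x hx
        · -- the digit run inside q' ++ z is empty: q' ++ z must start with a non-digit or be []
          rw [hq'] at h2
          simp only [List.length_nil, List.drop_zero] at h2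
          rcases h2 with h2 | h2
          · -- q' ++ z = [] : so q' = [] and z = []
            have hq'nil : q' = [] := by
              cases q' with
              | nil => rfl
              | cons a b => simp at h2
            have hznil : z = [] := by
              cases z with
              | nil => rfl
              | cons a b => rw [hq'nil] at h2; simp at h2
            subst hq'nil
            rw [PySem.Chars.strIsdigit]
            simp [PySem.Chars.isdigit, hc.1, hc.2]
          · -- head of q' ++ z is '.': impossible unless q' = [] and z = '.'::w
            cases q' with
            | nil =>
              rw [PySem.Chars.strIsdigit]
              simp [PySem.Chars.isdigit, hc.1, hc.2]
            | cons a b =>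
              exfalso
              simp only [List.cons_append, List.headD_cons] at h2
              -- a = '.' contradicts hdot; also pvDigits (a::…) = [] means a is not a digit
              exact hdot (by rw [h2]; exact List.mem_cons_of_mem _ List.mem_cons_self)
      · intro hdig
        rw [PySem.Chars.strIsdigit] at hdig
        simp only [Bool.and_eq_true, List.all_eq_true] at hdig
        have hall : ∀ x ∈ (c :: q'), '0' ≤ x ∧ x ≤ '9' := by
          intro x hx
          have := hdig.2 x hx
          rw [PySem.Chars.isdigit] at this
          simpa using this
        have hd := pvDigits_all hall z hz
        constructor
        · rw [hd]; simp
        · rw [hd]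
          rw [List.drop_append_of_le_length (le_refl _), List.drop_length, List.nil_append]
          rcases hz with hz | ⟨w, hz⟩ <;> subst hz
          · left; rfl
          · right; rfl
    · -- first char of q is not a digit: check fails, strIsdigit false
      have step : pvDigits ((c :: q') ++ z) = [] := by
        rw [List.cons_append, pvDigits, if_neg hc]
      constructor
      · intro hchk
        exact absurd step hchk.1
      · intro hdig
        exfalso
        rw [PySem.Chars.strIsdigit] at hdig
        simp only [Bool.and_eq_true, List.all_eq_true] at hdig
        have := hdig.2 c List.mem_cons_self
        rw [PySem.Chars.isdigit] at this
        simp at this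
        exact hc this

theorem pvDigits_join {q : List Char} (r : List (List Char))
    (hdig : PySem.Chars.strIsdigit q = true) :
    pvDigits (pvJoin (q :: r)) = q := by
  rw [PySem.Chars.strIsdigit] at hdig
  simp only [Bool.and_eq_true, List.all_eq_true] at hdig
  have hall : ∀ x ∈ q, '0' ≤ x ∧ x ≤ '9' := by
    intro x hx
    have := hdig.2 x hx
    rw [PySem.Chars.isdigit] at this
    simpa using this
  cases r with
  | nil =>
    have := pvDigits_all hall [] (Or.inl rfl)
    simpa using this
  | cons a b =>
    show pvDigits (q ++ '.' :: pvJoin (a :: b)) = q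
    exact pvDigits_all hall _ (Or.inr ⟨_, rfl⟩)

theorem pvJoin_decomp (q : List Char) (r : List (List Char)) :
    ∃ z, pvJoin (q :: r) = q ++ z ∧ (z = [] ∨ ∃ w, z = '.' :: w) := by
  cases r with
  | nil => exact ⟨[], by simp [pvJoin], Or.inl rfl⟩
  | cons a b => exact ⟨'.' :: pvJoin (a :: b), rfl, Or.inr ⟨_, rfl⟩⟩

-- ---- B-side: pvBTry characterization at a segment start ----
theorem pvBKeys_shape : ∀ k ∈ pvBKeys, k ≠ [] ∧ '.' ∉ k := by decide

theorem pvBTry_seg (p w : List Char) (hp : '.' ∉ p) :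
    ∀ (ks : List (List Char)), (∀ k ∈ ks, k ≠ [] ∧ '.' ∉ k) →
    pvBTry (p ++ '.' :: w) ks =
      if p ∈ ks ∧ pvDigits w ≠ [] ∧
          (w.drop (pvDigits w).length = [] ∨ (w.drop (pvDigits w).length).headD ' ' = '.') then
        some (PySem.Int.ofChars? (pvDigits w))
      else none := by
  intro ks
  induction ks with
  | nil =>
    intro _
    rw [if_neg (by simp)]
    rfl
  | cons k ks' ih =>
    intro hks
    have hkprop := hks k List.mem_cons_self
    have hks' : ∀ x ∈ ks', x ≠ [] ∧ '.' ∉ x := fun x hx => hks x (List.mem_cons_of_mem _ hx)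
    by_cases hkp : k = p
    · subst hkp
      rw [pvBTry]
      simp only [List.drop_left]
      rw [if_pos ⟨by rw [List.isPrefixOf_iff_prefix]; exact List.prefix_append _ _, by simp⟩]
      simp only [List.tail_cons]
      by_cases hchk : pvDigits w ≠ [] ∧
          (w.drop (pvDigits w).length = [] ∨ (w.drop (pvDigits w).length).headD ' ' = '.')
      · rw [if_pos hchk, if_pos ⟨List.mem_cons_self, hchk.1, hchk.2⟩]
      · rw [if_neg hchk, ih hks']
        rw [if_neg (fun hcc => hchk ⟨hcc.2.1, hcc.2.2⟩),
          if_neg (fun hcc => hchk ⟨hcc.2.1, hcc.2.2⟩)]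
    · have hmem : (p ∈ k :: ks' ∧ pvDigits w ≠ [] ∧
          (w.drop (pvDigits w).length = [] ∨ (w.drop (pvDigits w).length).headD ' ' = '.')) ↔
          (p ∈ ks' ∧ pvDigits w ≠ [] ∧
          (w.drop (pvDigits w).length = [] ∨ (w.drop (pvDigits w).length).headD ' ' = '.')) := by
        constructor
        · rintro ⟨h1, h2⟩
          rcases List.mem_cons.mp h1 with h1 | h1
          · exact absurd h1.symm hkp
          · exact ⟨h1, h2⟩
        · rintro ⟨h1, h2⟩
          exact ⟨List.mem_cons_of_mem _ h1, h2⟩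
      rw [pvBTry]
      by_cases hpre : k.isPrefixOf (p ++ '.' :: w) = true
      · have hprefix : k <+: (p ++ '.' :: w) := List.isPrefixOf_iff_prefix.mp hpre
        have hklen : k.length ≤ p.length := by
          by_contra hgt
          rw [Nat.not_le] at hgt
          have hlen2 : p.length < (p ++ '.' :: w).length := by
            rw [List.length_append, List.length_cons]; omega
          have hget : k[p.length]'hgt = (p ++ '.' :: w)[p.length]'hlen2 :=
            hprefix.getElem hgt
          have hdot2 : (p ++ '.' :: w)[p.length]'hlen2 = '.' := by
            rw [List.getElem_append_right (le_refl _)]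
            simp
          rw [hdot2] at hget
          exact hkprop.2 (hget ▸ List.getElem_mem hgt)
        have hktake : k = p.take k.length := by
          have h1 := List.prefix_iff_eq_take.mp hprefix
          rwa [List.take_append_of_le_length hklen] at h1
        have hklt : k.length < p.length := by
          rcases Nat.lt_or_ge k.length p.length with h | h
          · exact h
          · exfalso
            have heq : k.length = p.length := by omega
            rw [heq, List.take_length] at hktake
            exact hkp hktake
        -- drop k.length lands strictly inside p: the next char is not '.'
        have hdrop : (p ++ '.' :: w).drop k.length = p.drop k.length ++ '.' :: w :=
          List.drop_append_of_le_length hklen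
        have hpd : p.drop k.length = p[k.length] :: p.drop (k.length + 1) :=
          List.drop_eq_getElem_cons hklt
        have hnd : p[k.length] ≠ '.' := fun hh => hp (hh ▸ List.getElem_mem hklt)
        rw [if_neg, ih hks']
        · exact if_congr hmem.symm rfl rfl
        · intro hcc
          apply hnd
          have := hcc.2
          rw [hdrop, hpd] at this
          simp only [List.cons_append, List.headD_cons] at this
          exact this
      · rw [if_neg, ih hks']
        · exact if_congr hmem.symm rfl rfl
        · intro hcc
          exact hpre hcc.1

theorem pvBTry_nodot (p : List Char) (hp : '.' ∉ p) :
    ∀ (ks : List (List Char)), pvBTry p ks = none := by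
  intro ks
  induction ks with
  | nil => rfl
  | cons k ks' ih =>
    rw [pvBTry]
    rw [if_neg, ih]
    intro hcc
    have hhd := hcc.2
    cases hd : p.drop k.length with
    | nil => rw [hd] at hhd; simp at hhd
    | cons c t =>
      rw [hd] at hhd
      simp only [List.headD_cons] at hhd
      exact hp (hhd ▸ List.mem_of_mem_drop (hd ▸ List.mem_cons_self))

-- ---- B-side: scan over the dotted join ----
theorem pvBScan_cons (atStart : Bool) (c : Char) (t : List Char) :
    pvBScan atStart (c :: t) =
      if atStart then
        match pvBTry (c :: t) pvBKeys with
        | some r => r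
        | none => pvBScan (c == '.') t
      else pvBScan (c == '.') t := rfl

theorem pvBScan_skip (p : List Char) (hp : '.' ∉ p) (v : List Char) :
    pvBScan false (p ++ '.' :: v) = pvBScan true v := by
  induction p with
  | nil =>
    rw [List.nil_append, pvBScan_cons, if_neg Bool.false_ne_true]
    simp
  | cons c t ih =>
    have hc : c ≠ '.' := fun hh => hp (hh ▸ List.mem_cons_self)
    rw [List.cons_append, pvBScan_cons, if_neg Bool.false_ne_true, beq_eq_false_iff_ne.mpr hc]
    exact ih (fun hm => hp (List.mem_cons_of_mem _ hm))

theorem pvBScan_tail_none (p : List Char) (hp : '.' ∉ p) :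
    pvBScan false p = none := by
  induction p with
  | nil => rfl
  | cons c t ih =>
    have hc : c ≠ '.' := fun hh => hp (hh ▸ List.mem_cons_self)
    rw [pvBScan_cons, if_neg Bool.false_ne_true, beq_eq_false_iff_ne.mpr hc]
    exact ih (fun hm => hp (List.mem_cons_of_mem _ hm))

theorem pvBScan_join : ∀ (L : List (List Char)), (∀ p ∈ L, '.' ∉ p) →
    pvBScan true (pvJoin L) = pvRefB L := by
  intro L
  induction L with
  | nil => intro _; rfl
  | cons p r ihr =>
    intro hdf
    have hp : '.' ∉ p := hdf p List.mem_cons_self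
    have hdfr : ∀ x ∈ r, '.' ∉ x := fun x hx => hdf x (List.mem_cons_of_mem _ hx)
    cases r with
    | nil =>
      -- single segment, no pair to match
      show pvBScan true p = pvRefB [p]
      rw [pvRefB_single]
      cases p with
      | nil => rfl
      | cons c t =>
        rw [pvBScan_cons, if_pos rfl, pvBTry_nodot _ hp]
        have hc : c ≠ '.' := fun hh => hp (hh ▸ List.mem_cons_self)
        show pvBScan (c == '.') t = none
        rw [beq_eq_false_iff_ne.mpr hc]
        exact pvBScan_tail_none t (fun hm => hp (List.mem_cons_of_mem _ hm))
    | cons q r' =>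
      have hq : '.' ∉ q := hdfr q List.mem_cons_self
      have hjoin : pvJoin (p :: q :: r') = p ++ '.' :: pvJoin (q :: r') := rfl
      obtain ⟨z, hz1, hz2⟩ := pvJoin_decomp q r'
      have hdchk : pvDcheckP (pvJoin (q :: r')) ↔ PySem.Chars.strIsdigit q = true := by
        rw [hz1]; exact pvDcheck_iff q z hq hz2
      set w : List Char := pvJoin (q :: r') with hw
      cases p with
      | nil =>
        rw [hjoin, List.nil_append]
        have htry : pvBTry ([] ++ '.' :: w) pvBKeys = none := by
          rw [pvBTry_seg [] w (by simp) pvBKeys pvBKeys_shape,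
            if_neg (by intro hcc; exact absurd hcc.1 (by decide))]
        rw [List.nil_append] at htry
        rw [pvBScan_cons, if_pos rfl, htry]
        show pvBScan ('.' == '.') w = pvRefB ([] :: q :: r')
        rw [beq_self_eq_true, ihr hdfr, pvRefB_cons2,
          if_neg (by intro hcc; exact absurd hcc.1 (by decide))]
      | cons c t =>
        rw [hjoin]
        have hc : c ≠ '.' := fun hh => hp (hh ▸ List.mem_cons_self)
        have htry := pvBTry_seg (c :: t) w hp pvBKeys pvBKeys_shape
        by_cases hcond : (c :: t) ∈ pvBKeys ∧ pvDigits w ≠ [] ∧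
            (w.drop (pvDigits w).length = [] ∨ (w.drop (pvDigits w).length).headD ' ' = '.')
        · have hdig : PySem.Chars.strIsdigit q = true := hdchk.mp ⟨hcond.2.1, hcond.2.2⟩
          have htry2 : pvBTry ((c :: t) ++ '.' :: w) pvBKeys = some (PySem.Int.ofChars? q) := by
            rw [htry, if_pos hcond, hw, pvDigits_join r' hdig]
          rw [List.cons_append] at htry2 ⊢
          rw [pvBScan_cons, if_pos rfl, htry2]
          show PySem.Int.ofChars? q = pvRefB ((c :: t) :: q :: r')
          rw [pvRefB_cons2, if_pos ⟨hcond.1, hdig⟩]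
        · have htry2 : pvBTry ((c :: t) ++ '.' :: w) pvBKeys = none := by
            rw [htry, if_neg hcond]
          rw [List.cons_append] at htry2 ⊢
          rw [pvBScan_cons, if_pos rfl, htry2]
          show pvBScan (c == '.') (t ++ '.' :: w) = pvRefB ((c :: t) :: q :: r')
          rw [beq_eq_false_iff_ne.mpr hc,
            pvBScan_skip t (fun hm => hp (List.mem_cons_of_mem _ hm)), ihr hdfr, pvRefB_cons2,
            if_neg (by
              intro hcc
              exact hcond ⟨hcc.1, (hdchk.mpr hcc.2 : pvDcheckP w).1, (hdchk.mpr hcc.2 : pvDcheckP w).2⟩)]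

theorem pvB_eq_refB (module_name : String) :
    extract_moe_layer_id_from_name_alt module_name =
      pvRefB ((pvSplit module_name.toList).map (List.map PySem.Chars.lowerChar)) := by
  rw [extract_moe_layer_id_from_name_alt]
  have hlow : PySem.Chars.lower module_name.toList = List.map PySem.Chars.lowerChar module_name.toList :=
    rfl
  rw [hlow, ← pvSplit_lower]
  rw [← pvSplit_join (List.map PySem.Chars.lowerChar module_name.toList)]
  rw [pvBScan_join _ (pvSplit_dotfree _)]
  rw [pvSplit_join, pvSplit_lower]

-- ===== VERDICT (by name: the statement is the Claim_ definition above) =====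
theorem extract_moe_layer_id_from_name_spec : Claim_equal_extract_moe_layer_id_from_name := by
  intro module_name _hdom
  unfold Spec_extract_moe_layer_id_from_name
  rw [pvA_eq_refA, pvB_eq_refB, pvRefA_none_eq]
  rfl
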